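-- pv_equiv track=rewrite | github.com/datnt88/neural_coherence | utilities/data_helper.py | get_right_encode
-- ===== SOURCE A (Python) =====
-- import itertools
--
-- def get_right_encode(vb="S---XOS"):
--
--     priority_list = []
--     for ch in vb:
--         if ch == 'S':
--             priority_list.append("4")
--         elif ch =='O':
--             priority_list.append("3")
--         elif ch =='X':
--             priority_list.append("2")
--         else:
--             priority_list.append("1")
--
--     x = list(itertools.combinations(priority_list, 3))
--     combs = []
--     for tupl in x:
--         combs.append(int(''.join(tupl)))
--
--     x_vb = str(max(combs))
--
--     right_vb = ""
--     for ch in x_vb: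
--         if ch == '4':
--             right_vb = right_vb + "S"
--         elif ch =='3':
--             right_vb = right_vb + "O"
--         elif ch =='2':
--             right_vb = right_vb + "X"
--         else:
--             right_vb = right_vb + "-"
--
--     return right_vb
-- ===== SOURCE B (Python) =====
-- def get_right_encode(vb="S---XOS"):
--     # Single left-to-right DP pass: b_k = best (max) value of a length-k
--     # subsequence of priority digits seen so far (0 = "none yet"; valid
--     # because every digit is >= 1 and the input has >= 3 characters).
--     b1 = b2 = b3 = 0
--     for ch in vb:
--         d = 4 if ch == 'S' else 3 if ch == 'O' else 2 if ch == 'X' else 1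
--         b3 = max(b3, b2 * 10 + d)
--         b2 = max(b2, b1 * 10 + d)
--         b1 = max(b1, d)
--     back = lambda d: 'S' if d == 4 else 'O' if d == 3 else 'X' if d == 2 else '-'
--     return back(b3 // 100) + back(b3 // 10 % 10) + back(b3 % 10)
-- ===== Notes on version B (the rewrite author's own statement) =====
-- stated objective: faster
-- what changed: A materialises all C(n,3) length-3 combinations of priority digits, joins and parses each as a decimal int and takes the max; B does one left-to-right DP pass keeping the best 1-, 2- and 3-digit subsequence values and decodes the three digits arithmetically.
import Mathlib
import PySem

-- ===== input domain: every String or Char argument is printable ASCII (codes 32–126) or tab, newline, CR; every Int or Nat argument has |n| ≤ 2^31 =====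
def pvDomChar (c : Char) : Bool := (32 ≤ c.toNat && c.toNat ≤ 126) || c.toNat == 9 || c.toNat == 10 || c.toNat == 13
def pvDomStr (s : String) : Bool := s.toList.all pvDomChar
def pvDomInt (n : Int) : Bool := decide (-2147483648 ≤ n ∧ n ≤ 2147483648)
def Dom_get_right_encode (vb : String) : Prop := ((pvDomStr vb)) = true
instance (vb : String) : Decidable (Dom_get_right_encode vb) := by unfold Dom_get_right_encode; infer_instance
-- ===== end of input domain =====

-- B replaces A's enumeration of all O(n^3) length-3 combinations by a single
-- left-to-right best-subsequence DP pass (O(n)); equivalence is proved for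
-- inputs of length ≥ 3 (A raises ValueError below that).

-- ===== PORT A =====
def prA1 (ch : Char) : String :=
  if ch = 'S' then "4" else if ch = 'O' then "3" else if ch = 'X' then "2" else "1"

def get_right_encode (vb : String) : String :=
  let priority_list := vb.toList.foldl (fun acc ch => acc ++ [prA1 ch]) []
  let x := PySem.List.combinations priority_list 3
  let combs := x.foldl (fun acc t => acc ++ [(PySem.Int.ofStr? (PySem.Str.join "" t)).getD 0]) ([] : List Int)
  match PySem.List.max? combs (fun v => v) with
  | none => ""   -- Python raises ValueError here (max of empty); excluded by Pre_
  | some m =>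
      let x_vb := PySem.Int.toStr m
      x_vb.toList.foldl (fun acc ch =>
        acc ++ (if ch = '4' then "S" else if ch = '3' then "O" else if ch = '2' then "X" else "-")) ""

-- ===== PORT B =====
def bstep (s : Int × Int × Int) (ch : Char) : Int × Int × Int :=
  let d : Int := if ch = 'S' then 4 else if ch = 'O' then 3 else if ch = 'X' then 2 else 1
  (max s.1 d, max s.2.1 (s.1 * 10 + d), max s.2.2 (s.2.1 * 10 + d))

def backc (d : Int) : Char :=
  if d = 4 then 'S' else if d = 3 then 'O' else if d = 2 then 'X' else '-'

def get_right_encode_alt (vb : String) : String :=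
  let s := vb.toList.foldl bstep (0, 0, 0)
  let b3 := s.2.2
  String.ofList [backc (PySem.Int.floordiv b3 100),
             backc (PySem.Int.mod (PySem.Int.floordiv b3 10) 10),
             backc (PySem.Int.mod b3 10)]

-- ===== PRECONDITION & SPEC =====
-- A calls max() on the list of length-3 combinations: on strings shorter than
-- 3 that list is empty and Python raises ValueError, so those are excluded.
def Pre_get_right_encode (vb : String) : Prop := 3 ≤ vb.toList.length
instance (vb : String) : Decidable (Pre_get_right_encode vb) := by
  unfold Pre_get_right_encode; infer_instance

def pvWitness_get_right_encode : String := "S---XOS"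

def Spec_get_right_encode (vb : String) (out : String) : Prop := out = get_right_encode_alt vb
instance (vb : String) (out : String) : Decidable (Spec_get_right_encode vb out) := by
  unfold Spec_get_right_encode; infer_instance

-- ===== CLAIM (what is proved, stated in full; the proofs are below) =====
def Claim_equal_get_right_encode : Prop :=
  ∀ (vb : String), Dom_get_right_encode vb → Pre_get_right_encode vb →
    Spec_get_right_encode vb (get_right_encode vb)

-- ===== LEMMAS AND PROOFS =====

-- priority of a character (the digit A encodes it as, B's d)
def prio (ch : Char) : Int :=
  if ch = 'S' then 4 else if ch = 'O' then 3 else if ch = 'X' then 2 else 1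

-- value of a combination: its priority digits read as a decimal number
def tv (c : List Char) : Int := c.foldl (fun a ch => a * 10 + prio ch) 0

def omaxI : Option Int → Option Int → Option Int
  | none, b => b
  | some x, none => some x
  | some x, some y => some (max x y)

-- best (maximal) value over length-1 / 2 / 3 combinations
def best1 : List Char → Option Int
  | [] => none
  | c :: l => omaxI (some (prio c)) (best1 l)

def best2 : List Char → Option Int
  | [] => none
  | c :: l => omaxI ((best1 l).map (fun x => 10 * prio c + x)) (best2 l)

def best3 : List Char → Option Int
  | [] => none
  | c :: l => omaxI ((best2 l).map (fun x => 100 * prio c + x)) (best3 l)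

def mrg (b : Int) : Option Int → Int
  | none => b
  | some x => max b x

theorem prio_bounds (ch : Char) : 1 ≤ prio ch ∧ prio ch ≤ 4 := by
  unfold prio; split_ifs <;> norm_num

theorem best1_bounds (l : List Char) (v : Int) (h : best1 l = some v) : 1 ≤ v ∧ v ≤ 4 := by
  induction l generalizing v with
  | nil => simp [best1] at h
  | cons c l ih =>
    rw [best1] at h
    rcases h1 : best1 l with _ | w <;> rw [h1] at h <;> simp [omaxI] at h
    · exact h ▸ prio_bounds c
    · have := ih w h1
      have := prio_bounds c
      rcases max_choice (prio c) w with hm | hm <;> omega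

theorem best2_struct (l : List Char) (v : Int) (h : best2 l = some v) :
    ∃ pb pc : Int, 1 ≤ pb ∧ pb ≤ 4 ∧ 1 ≤ pc ∧ pc ≤ 4 ∧ v = 10 * pb + pc := by
  induction l generalizing v with
  | nil => simp [best2] at h
  | cons c l ih =>
    rw [best2] at h
    rcases h1 : best1 l with _ | w <;> rcases h2 : best2 l with _ | u <;>
      rw [h1, h2] at h <;> simp [omaxI] at h
    · obtain ⟨pb, pc, a1, a2, a3, a4, a5⟩ := ih u h2
      exact ⟨pb, pc, a1, a2, a3, a4, by omega⟩
    · refine ⟨prio c, w, (prio_bounds c).1, (prio_bounds c).2,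
        (best1_bounds l w h1).1, (best1_bounds l w h1).2, by omega⟩
    · rcases max_choice (10 * prio c + w) u with hm | hm
      · exact ⟨prio c, w, (prio_bounds c).1, (prio_bounds c).2,
          (best1_bounds l w h1).1, (best1_bounds l w h1).2, by omega⟩
      · obtain ⟨pb, pc, a1, a2, a3, a4, a5⟩ := ih u h2
        exact ⟨pb, pc, a1, a2, a3, a4, by omega⟩

theorem best3_struct (l : List Char) (v : Int) (h : best3 l = some v) :
    ∃ pa pb pc : Int, 1 ≤ pa ∧ pa ≤ 4 ∧ 1 ≤ pb ∧ pb ≤ 4 ∧ 1 ≤ pc ∧ pc ≤ 4 ∧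
      v = 100 * pa + 10 * pb + pc := by
  induction l generalizing v with
  | nil => simp [best3] at h
  | cons c l ih =>
    rw [best3] at h
    rcases h2 : best2 l with _ | u <;> rcases h3 : best3 l with _ | t <;>
      rw [h2, h3] at h <;> simp [omaxI] at h
    · obtain ⟨pa, pb, pc, a1, a2, a3, a4, a5, a6, a7⟩ := ih t h3
      exact ⟨pa, pb, pc, a1, a2, a3, a4, a5, a6, by omega⟩
    · obtain ⟨pb, pc, h1, h2', h3', h4, h5⟩ := best2_struct l u h2
      exact ⟨prio c, pb, pc, (prio_bounds c).1, (prio_bounds c).2, h1, h2', h3', h4, by omega⟩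
    · obtain ⟨pb, pc, h1, h2', h3', h4, h5⟩ := best2_struct l u h2
      obtain ⟨pa', pb', pc', a1, a2, a3, a4, a5, a6, a7⟩ := ih t h3
      rcases max_choice (100 * prio c + u) t with hm | hm
      · exact ⟨prio c, pb, pc, (prio_bounds c).1, (prio_bounds c).2, h1, h2', h3', h4, by omega⟩
      · exact ⟨pa', pb', pc', a1, a2, a3, a4, a5, a6, by omega⟩

theorem best1_some (l : List Char) (h : l ≠ []) : ∃ v, best1 l = some v := by
  cases l with
  | nil => simp at h
  | cons c l =>
    rw [best1]; rcases best1 l with _ | w <;> simp [omaxI]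

theorem best2_some (l : List Char) (h : 2 ≤ l.length) : ∃ v, best2 l = some v := by
  cases l with
  | nil => simp at h
  | cons c l =>
    rw [best2]
    obtain ⟨w, hw⟩ := best1_some l (by rintro rfl; simp at h)
    rw [hw]; rcases best2 l with _ | u <;> simp [omaxI]

theorem best3_some (l : List Char) (h : 3 ≤ l.length) : ∃ v, best3 l = some v := by
  cases l with
  | nil => simp at h
  | cons c l =>
    rw [best3]
    obtain ⟨w, hw⟩ := best2_some l (by simp at h; omega)
    rw [hw]; rcases best3 l with _ | u <;> simp [omaxI]

theorem best1_ub (l : List Char) (v : Int) (h : best1 l = some v) :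
    ∀ ch ∈ l, prio ch ≤ v := by
  induction l generalizing v with
  | nil => simp
  | cons c l ih =>
    rw [best1] at h
    intro ch hch
    rcases h1 : best1 l with _ | w <;> rw [h1] at h <;> simp [omaxI] at h <;>
      rcases List.mem_cons.mp hch with hc | hc
    · subst hc; omega
    · obtain ⟨w, hw⟩ := best1_some l (by rintro rfl; simp at hc)
      rw [hw] at h1; exact absurd h1 (by simp)
    · subst hc; omega
    · have := ih w h1 ch hc; omega

theorem best1_mem (l : List Char) (v : Int) (h : best1 l = some v) :
    ∃ ch ∈ l, prio ch = v := by
  induction l generalizing v with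
  | nil => simp [best1] at h
  | cons c l ih =>
    rw [best1] at h
    rcases h1 : best1 l with _ | w <;> rw [h1] at h <;> simp [omaxI] at h
    · exact ⟨c, by simp, h⟩
    · rcases max_choice (prio c) w with hm | hm
      · exact ⟨c, by simp, by omega⟩
      · obtain ⟨ch, hch, he⟩ := ih w h1
        exact ⟨ch, by simp [hch], by omega⟩

theorem tv_pair (a b : Char) : tv [a, b] = 10 * prio a + prio b := by
  simp [tv]; ring

theorem tv_triple (a b c : Char) : tv [a, b, c] = 100 * prio a + 10 * prio b + prio c := by
  simp [tv]; ring

theorem best2_ub (l : List Char) (v : Int) (h : best2 l = some v) :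
    ∀ c ∈ PySem.List.combinations l 2, tv c ≤ v := by
  induction l generalizing v with
  | nil => intro c hc; simp [PySem.List.combinations_nil_succ] at hc
  | cons x l ih =>
    rw [best2] at h
    intro c hc
    rw [show (2 : Nat) = 1 + 1 from rfl, PySem.List.combinations_cons_succ] at hc
    rcases List.mem_append.mp hc with hc | hc
    · obtain ⟨p, hp, rfl⟩ := List.mem_map.mp hc
      rw [PySem.List.combinations_one] at hp
      obtain ⟨a, ha, rfl⟩ := List.mem_map.mp hp
      rw [tv_pair]
      obtain ⟨w, hw⟩ := best1_some l (by rintro rfl; simp at ha)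
      have hub := best1_ub l w hw a ha
      rw [hw] at h
      rcases h2 : best2 l with _ | u <;> rw [h2] at h <;> simp [omaxI] at h <;> omega
    · obtain ⟨hsub, hlen⟩ := (PySem.List.mem_combinations_iff l 2 c).mp hc
      obtain ⟨u, hu⟩ := best2_some l (hlen ▸ hsub.length_le)
      rw [hu] at h
      have hle := ih u hu c hc
      rcases h1 : best1 l with _ | w <;> rw [h1] at h <;> simp [omaxI] at h <;> omega

theorem best2_mem (l : List Char) (v : Int) (h : best2 l = some v) :
    ∃ c ∈ PySem.List.combinations l 2, tv c = v := by
  induction l generalizing v with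
  | nil => simp [best2] at h
  | cons x l ih =>
    rw [best2] at h
    rcases h1 : best1 l with _ | w <;> rcases h2 : best2 l with _ | u <;>
      rw [h1, h2] at h <;> simp [omaxI] at h
    · obtain ⟨c, hc, he⟩ := ih u h2
      refine ⟨c, ?_, by omega⟩
      rw [show (2 : Nat) = 1 + 1 from rfl, PySem.List.combinations_cons_succ]
      exact List.mem_append_right _ hc
    · obtain ⟨a, ha, he⟩ := best1_mem l w h1
      refine ⟨[x, a], ?_, by rw [tv_pair]; omega⟩
      rw [show (2 : Nat) = 1 + 1 from rfl, PySem.List.combinations_cons_succ]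
      exact List.mem_append_left _ (List.mem_map.mpr ⟨[a],
        (PySem.List.combinations_one l) ▸ List.mem_map.mpr ⟨a, ha, rfl⟩, rfl⟩)
    · rcases max_choice (10 * prio x + w) u with hm | hm
      · obtain ⟨a, ha, he⟩ := best1_mem l w h1
        refine ⟨[x, a], ?_, by rw [tv_pair]; omega⟩
        rw [show (2 : Nat) = 1 + 1 from rfl, PySem.List.combinations_cons_succ]
        exact List.mem_append_left _ (List.mem_map.mpr ⟨[a],
          (PySem.List.combinations_one l) ▸ List.mem_map.mpr ⟨a, ha, rfl⟩, rfl⟩)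
      · obtain ⟨c, hc, he⟩ := ih u h2
        refine ⟨c, ?_, by omega⟩
        rw [show (2 : Nat) = 1 + 1 from rfl, PySem.List.combinations_cons_succ]
        exact List.mem_append_right _ hc

theorem best3_ub (l : List Char) (v : Int) (h : best3 l = some v) :
    ∀ c ∈ PySem.List.combinations l 3, tv c ≤ v := by
  induction l generalizing v with
  | nil => intro c hc; simp [PySem.List.combinations_nil_succ] at hc
  | cons x l ih =>
    rw [best3] at h
    intro c hc
    rw [show (3 : Nat) = 2 + 1 from rfl, PySem.List.combinations_cons_succ] at hc
    rcases List.mem_append.mp hc with hc | hc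
    · obtain ⟨p, hp, rfl⟩ := List.mem_map.mp hc
      obtain ⟨hsub, hlen⟩ := (PySem.List.mem_combinations_iff l 2 p).mp hp
      obtain ⟨u, hu⟩ := best2_some l (hlen ▸ hsub.length_le)
      have hub := best2_ub l u hu p hp
      obtain ⟨a, b, rfl⟩ : ∃ a b, p = [a, b] := by
        rcases p with _ | ⟨a, _ | ⟨b, _ | _⟩⟩ <;> simp at hlen; exact ⟨a, b, rfl⟩
      rw [hu] at h
      have htv : tv [x, a, b] = 100 * prio x + tv [a, b] := by
        rw [tv_triple, tv_pair]; ring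
      rw [htv]
      rcases h3 : best3 l with _ | t <;> rw [h3] at h <;> simp [omaxI] at h <;> omega
    · obtain ⟨hsub, hlen⟩ := (PySem.List.mem_combinations_iff l 3 c).mp hc
      obtain ⟨t, ht⟩ := best3_some l (hlen ▸ hsub.length_le)
      rw [ht] at h
      have hle := ih t ht c hc
      rcases h2 : best2 l with _ | u <;> rw [h2] at h <;> simp [omaxI] at h <;> omega

theorem best3_mem (l : List Char) (v : Int) (h : best3 l = some v) :
    ∃ c ∈ PySem.List.combinations l 3, tv c = v := by
  induction l generalizing v with
  | nil => simp [best3] at h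
  | cons x l ih =>
    rw [best3] at h
    rcases h2 : best2 l with _ | u <;> rcases h3 : best3 l with _ | t <;>
      rw [h2, h3] at h <;> simp [omaxI] at h
    · obtain ⟨c, hc, he⟩ := ih t h3
      refine ⟨c, ?_, by omega⟩
      rw [show (3 : Nat) = 2 + 1 from rfl, PySem.List.combinations_cons_succ]
      exact List.mem_append_right _ hc
    · obtain ⟨p, hp, he⟩ := best2_mem l u h2
      obtain ⟨hsub, hlen⟩ := (PySem.List.mem_combinations_iff l 2 p).mp hp
      obtain ⟨a, b, rfl⟩ : ∃ a b, p = [a, b] := by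
        rcases p with _ | ⟨a, _ | ⟨b, _ | _⟩⟩ <;> simp at hlen; exact ⟨a, b, rfl⟩
      refine ⟨[x, a, b], ?_, by rw [tv_triple]; rw [tv_pair] at he; omega⟩
      rw [show (3 : Nat) = 2 + 1 from rfl, PySem.List.combinations_cons_succ]
      exact List.mem_append_left _ (List.mem_map.mpr ⟨[a, b], hp, rfl⟩)
    · rcases max_choice (100 * prio x + u) t with hm | hm
      · obtain ⟨p, hp, he⟩ := best2_mem l u h2
        obtain ⟨hsub, hlen⟩ := (PySem.List.mem_combinations_iff l 2 p).mp hp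
        obtain ⟨a, b, rfl⟩ : ∃ a b, p = [a, b] := by
          rcases p with _ | ⟨a, _ | ⟨b, _ | _⟩⟩ <;> simp at hlen; exact ⟨a, b, rfl⟩
        refine ⟨[x, a, b], ?_, by rw [tv_triple]; rw [tv_pair] at he; omega⟩
        rw [show (3 : Nat) = 2 + 1 from rfl, PySem.List.combinations_cons_succ]
        exact List.mem_append_left _ (List.mem_map.mpr ⟨[a, b], hp, rfl⟩)
      · obtain ⟨c, hc, he⟩ := ih t h3
        refine ⟨c, ?_, by omega⟩
        rw [show (3 : Nat) = 2 + 1 from rfl, PySem.List.combinations_cons_succ]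
        exact List.mem_append_right _ hc

-- A's joined-and-parsed combination value is the decimal digit value
theorem parse_triple (a b c : Char) :
    (PySem.Int.ofStr? (PySem.Str.join "" [prA1 a, prA1 b, prA1 c])).getD 0 =
      100 * prio a + 10 * prio b + prio c := by
  unfold prA1 prio
  split_ifs <;> decide

-- B's fold, fully characterised with a generalised accumulator
theorem bstep_eq (s : Int × Int × Int) (ch : Char) :
    bstep s ch = (max s.1 (prio ch), max s.2.1 (s.1 * 10 + prio ch),
      max s.2.2 (s.2.1 * 10 + prio ch)) := rfl

theorem tmax1 (a b x : Int) : 10 * max a b + x = max (10 * a + x) (10 * b + x) := by omega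

theorem tmax2 (a b x : Int) : 100 * max a b + x = max (100 * a + x) (100 * b + x) := by omega

theorem tmax3 (x a b : Int) : x + max a b = max (x + a) (x + b) := by omega

theorem fold_bstep (l : List Char) : ∀ b1 b2 b3 : Int,
    l.foldl bstep (b1, b2, b3) =
      (mrg b1 (best1 l),
       mrg b2 (omaxI ((best1 l).map (fun x => 10 * b1 + x)) (best2 l)),
       mrg b3 (omaxI ((best1 l).map (fun x => 10 * b2 + x))
                 (omaxI ((best2 l).map (fun x => 100 * b1 + x)) (best3 l)))) := by
  induction l with
  | nil => intro b1 b2 b3; simp [best1, best2, best3, mrg, omaxI]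
  | cons c l ih =>
    intro b1 b2 b3
    rw [List.foldl_cons, bstep_eq, ih, best1, best2, best3]
    generalize prio c = d
    rcases best1 l with _ | v1 <;> rcases best2 l with _ | v2 <;> rcases best3 l with _ | v3 <;>
      simp only [mrg, omaxI, Option.map_some, Option.map_none, Prod.mk.injEq] <;>
      refine ⟨?_, ?_, ?_⟩ <;>
      first
      | trivial
      | (simp only [tmax1, tmax2, tmax3]; ring_nf;
         first
         | rfl
         | (simp only [max_comm, max_assoc, max_left_comm]))
      | omega

-- the number A maximises over equals tv on every length-3 combination
theorem combs_eq_map_tv (l : List Char) :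
    (PySem.List.combinations (l.map prA1) 3).foldl
        (fun acc t => acc ++ [(PySem.Int.ofStr? (PySem.Str.join "" t)).getD 0]) ([] : List Int) =
      (PySem.List.combinations l 3).map tv := by
  rw [PySem.List.combinations_map]
  rw [show ((PySem.List.combinations l 3).map (List.map prA1)).foldl
      (fun acc t => acc ++ [(PySem.Int.ofStr? (PySem.Str.join "" t)).getD 0]) ([] : List Int) =
      [] ++ ((PySem.List.combinations l 3).map (List.map prA1)).map
        (fun t => (PySem.Int.ofStr? (PySem.Str.join "" t)).getD 0) from
    PySem.List.foldl_append_singleton_eq_map _ _ []]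
  rw [List.nil_append, List.map_map]
  refine List.map_congr_left (fun c hc => ?_)
  obtain ⟨hsub, hlen⟩ := (PySem.List.mem_combinations_iff l 3 c).mp hc
  obtain ⟨a, b, c', rfl⟩ : ∃ a b c', c = [a, b, c'] := by
    rcases c with _ | ⟨a, _ | ⟨b, _ | ⟨c', _ | _⟩⟩⟩ <;> simp at hlen; exact ⟨a, b, c', rfl⟩
  simp only [Function.comp_apply, List.map_cons, List.map_nil]
  rw [parse_triple, tv_triple]

-- A's max over all combinations is best3
theorem max_combs_eq_best3 (l : List Char) (v : Int) (h : best3 l = some v) :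
    PySem.List.max? ((PySem.List.combinations l 3).map tv) (fun y => y) = some v := by
  obtain ⟨c0, hc0, he0⟩ := best3_mem l v h
  have hv_mem : v ∈ (PySem.List.combinations l 3).map tv :=
    List.mem_map.mpr ⟨c0, hc0, he0⟩
  rcases hm : PySem.List.max? ((PySem.List.combinations l 3).map tv) (fun y => y) with _ | m
  · rw [PySem.List.max?_eq_none_iff] at hm
    rw [hm] at hv_mem; simp at hv_mem
  · have hmem := PySem.List.max?_mem hm
    have hmax := PySem.List.max?_isMax hm
    obtain ⟨c, hc, he⟩ := List.mem_map.mp hmem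
    have h1 : m ≤ v := he ▸ best3_ub l v h c hc
    have h2 : v ≤ m := hmax v hv_mem
    rw [show m = v by omega]

-- final digit-by-digit equality of the two output encodings
theorem output_eq (pa pb pc : Int) (h1 : 1 ≤ pa) (h2 : pa ≤ 4) (h3 : 1 ≤ pb) (h4 : pb ≤ 4)
    (h5 : 1 ≤ pc) (h6 : pc ≤ 4) :
    (PySem.Int.toStr (100 * pa + 10 * pb + pc)).toList.foldl (fun acc ch =>
        acc ++ (if ch = '4' then "S" else if ch = '3' then "O" else if ch = '2' then "X" else "-")) ""
      = String.ofList [backc (PySem.Int.floordiv (100 * pa + 10 * pb + pc) 100),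
          backc (PySem.Int.mod (PySem.Int.floordiv (100 * pa + 10 * pb + pc) 10) 10),
          backc (PySem.Int.mod (100 * pa + 10 * pb + pc) 10)] := by
  interval_cases pa <;> interval_cases pb <;> interval_cases pc <;> decide

-- ===== VERDICT (by name: the statement is the Claim_ definition above) =====
theorem get_right_encode_spec : Claim_equal_get_right_encode := by
  intro vb _ hpre
  have hpre' : 3 ≤ vb.toList.length := hpre
  unfold Spec_get_right_encode
  simp only [get_right_encode, get_right_encode_alt]
  rw [show vb.toList.foldl (fun acc ch => acc ++ [prA1 ch]) [] = [] ++ vb.toList.map prA1 from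
    PySem.List.foldl_append_singleton_eq_map _ _ [], List.nil_append, combs_eq_map_tv]
  obtain ⟨v3, hv3⟩ := best3_some vb.toList hpre'
  rw [max_combs_eq_best3 vb.toList v3 hv3]
  obtain ⟨pa, pb, pc, b1, b2, b3, b4, b5, b6, hv⟩ := best3_struct vb.toList v3 hv3
  obtain ⟨v1, hv1⟩ := best1_some vb.toList (by rintro hnil; rw [hnil] at hpre'; simp at hpre')
  obtain ⟨v2, hv2⟩ := best2_some vb.toList (by omega)
  have hb1 := best1_bounds vb.toList v1 hv1
  obtain ⟨qb, qc, q1, q2, q3, q4, q5⟩ := best2_struct vb.toList v2 hv2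
  have hfold := fold_bstep vb.toList 0 0 0
  rw [hv1, hv2, hv3] at hfold
  have hthird : (vb.toList.foldl bstep (0, 0, 0)).2.2 = v3 := by
    rw [hfold]; simp only [Option.map_some, mrg, omaxI]; omega
  rw [hthird, hv]
  exact output_eq pa pb pc b1 b2 b3 b4 b5 b6
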